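-- pv_equiv track=rewrite | github.com/42euge/attention-bench | src/parse_kaggle_output.py | extract_vigilance_table
-- ===== SOURCE A (Python) =====
-- def extract_vigilance_table(stdout: str) -> str:
--     """Extract the Vigilance results section."""
--     lines = stdout.split("\n")
--     in_section = False
--     table_lines = []
--     for line in lines:
--         if "Vigilance Results" in line:
--             in_section = True
--             table_lines.append(line)
--             continue
--         if in_section:
--             if line.startswith("===") and "Vigilance" not in line:
--                 break
--             table_lines.append(line)
--     return "\n".join(table_lines)
-- ===== SOURCE B (Python) =====
-- def extract_vigilance_table(stdout: str) -> str:
--     """Extract the Vigilance results section (locate boundaries, then slice)."""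
--     lines = stdout.split("\n")
--     start = next((i for i, line in enumerate(lines) if "Vigilance Results" in line), None)
--     if start is None:
--         return ""
--     end = next((j for j in range(start + 1, len(lines))
--                 if lines[j].startswith("===") and "Vigilance" not in lines[j]),
--                len(lines))
--     return "\n".join(lines[start:end])
-- ===== Notes on version B (the rewrite author's own statement) =====
-- stated objective: simpler
-- what changed: Replaced the stateful flag-and-accumulator loop (with an in-loop break) by a locate-boundaries-then-slice decomposition: find the start line containing 'Vigilance Results', find the first terminator line after it, and join the slice.
import Mathlib
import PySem

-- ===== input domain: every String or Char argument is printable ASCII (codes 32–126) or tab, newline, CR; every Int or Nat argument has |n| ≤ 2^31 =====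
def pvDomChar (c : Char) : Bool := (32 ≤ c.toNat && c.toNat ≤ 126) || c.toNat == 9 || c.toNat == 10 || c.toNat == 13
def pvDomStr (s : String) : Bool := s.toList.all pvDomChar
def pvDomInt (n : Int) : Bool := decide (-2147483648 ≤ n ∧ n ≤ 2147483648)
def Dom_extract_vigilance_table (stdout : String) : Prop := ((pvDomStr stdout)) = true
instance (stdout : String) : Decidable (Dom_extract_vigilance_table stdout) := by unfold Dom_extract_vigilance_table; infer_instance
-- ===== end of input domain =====

-- B replaces A's stateful flag/accumulator loop by a locate-boundaries-then-slice decomposition (same cost).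

-- ===== PORT A =====
-- line contains "Vigilance Results"
def isVR (l : String) : Bool := PySem.Str.isIn "Vigilance Results" l
-- terminator: line.startswith("===") and "Vigilance" not in line
def isTerm (l : String) : Bool := PySem.Str.startswith l "===" && !PySem.Str.isIn "Vigilance" l

-- A's for-loop over lines, state = (in_section, table_lines); returning the accumulator models `break`
def aLoop : List String → Bool → List String → List String
  | [], _, acc => acc
  | l :: ls, ins, acc =>
    if isVR l then aLoop ls true (acc ++ [l])
    else if ins then
      if isTerm l then acc
      else aLoop ls true (acc ++ [l])
    else aLoop ls ins acc

def extract_vigilance_table (stdout : String) : String :=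
  let lines := (PySem.Str.split? stdout "\n").getD []   -- sep "\n" ≠ "": split? is always `some` here
  PySem.Str.join "\n" (aLoop lines false [])

-- ===== PORT B =====
def extract_vigilance_table_alt (stdout : String) : String :=
  let lines := (PySem.Str.split? stdout "\n").getD []   -- sep "\n" ≠ "": split? is always `some` here
  match lines.findIdx? isVR with
  | none => ""
  | some start =>
      let stop : Nat :=
        match (lines.drop (start + 1)).findIdx? isTerm with
        | some k => start + 1 + k
        | none => lines.length
      PySem.Str.join "\n" ((lines.drop start).take (stop - start))

-- ===== PRECONDITION & SPEC =====
def Spec_extract_vigilance_table (stdout : String) (out : String) : Prop := out = extract_vigilance_table_alt stdout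
instance (stdout : String) (out : String) : Decidable (Spec_extract_vigilance_table stdout out) := by unfold Spec_extract_vigilance_table; infer_instance

-- ===== CLAIM (what is proved, stated in full; the proofs are below) =====
def Claim_equal_extract_vigilance_table : Prop := ∀ (stdout : String), Dom_extract_vigilance_table stdout → Spec_extract_vigilance_table stdout (extract_vigilance_table stdout)

-- ===== LEMMAS AND PROOFS =====

lemma isTerm_eq_false_of_isVR (l : String) (h : isVR l = true) : isTerm l = false := by
  simp only [isVR, PySem.Str.isIn_iff_infix] at h
  have hv : PySem.Str.isIn "Vigilance" l = true :=
    (PySem.Str.isIn_iff_infix _ _).mpr (List.IsInfix.trans (by decide) h)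
  simp only [isTerm, hv, Bool.not_true, Bool.and_false]
lemma aLoop_true (ls : List String) (acc : List String) :
    aLoop ls true acc = acc ++ ls.takeWhile (fun l => !isTerm l) := by
  induction ls generalizing acc with
  | nil => simp [aLoop]
  | cons l ls ih =>
    by_cases hv : isVR l = true
    · have ht := isTerm_eq_false_of_isVR l hv
      simp [aLoop, hv, ht, ih]
    · by_cases ht : isTerm l = true
      · simp [aLoop, hv, ht]
      · simp only [Bool.not_eq_true] at hv ht
        simp [aLoop, hv, ht, ih]
lemma take_eq_takeWhile_of_findIdx?_some {α} (p : α → Bool) (xs : List α) (k : Nat)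
    (h : xs.findIdx? p = some k) : xs.take k = xs.takeWhile (fun x => !p x) := by
  induction xs generalizing k with
  | nil => simp at h
  | cons x xs ih =>
    rw [List.findIdx?_cons] at h
    by_cases hx : p x = true
    · simp [hx] at h
      simp [← h, hx]
    · simp only [Bool.not_eq_true] at hx
      simp [hx] at h
      obtain ⟨k', hk', rfl⟩ := h
      simp [hx, ih k' hk']
lemma takeWhile_eq_self_of_findIdx?_none {α} (p : α → Bool) (xs : List α)
    (h : xs.findIdx? p = none) : xs.takeWhile (fun x => !p x) = xs := by
  rw [List.findIdx?_eq_none_iff] at h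
  exact List.takeWhile_eq_self_iff.mpr (by intro x hx; simp [h x hx])
lemma core_eq (ls : List String) :
    PySem.Str.join "\n" (aLoop ls false []) =
      (match ls.findIdx? isVR with
       | none => ""
       | some start =>
           PySem.Str.join "\n" ((ls.drop start).take
             ((match (ls.drop (start + 1)).findIdx? isTerm with
               | some k => start + 1 + k
               | none => ls.length) - start))) := by
  induction ls with
  | nil => decide
  | cons l ls ih =>
    by_cases hv : isVR l = true
    · have h0 : (l :: ls).findIdx? isVR = some 0 := by simp [List.findIdx?_cons, hv]
      rw [show aLoop (l :: ls) false [] = aLoop ls true [l] by simp [aLoop, hv]]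
      rw [aLoop_true, h0]
      simp only [List.drop_succ_cons, List.drop_zero, List.length_cons, Nat.sub_zero, Nat.zero_add]
      cases h : ls.findIdx? isTerm with
      | none =>
        rw [takeWhile_eq_self_of_findIdx?_none _ _ h]
        rw [List.take_of_length_le (by simp)]
        simp
      | some k =>
        show _ = PySem.Str.join "\n" (List.take (1 + k) (l :: ls))
        rw [Nat.add_comm 1 k, List.take_succ_cons,
          take_eq_takeWhile_of_findIdx?_some _ _ _ h, List.singleton_append]
    · simp only [Bool.not_eq_true] at hv
      rw [show aLoop (l :: ls) false [] = aLoop ls false [] by simp [aLoop, hv]]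
      rw [ih]
      have h0 : (l :: ls).findIdx? isVR = (ls.findIdx? isVR).map (· + 1) := by
        simp [List.findIdx?_cons, hv]
      rw [h0]
      cases h : ls.findIdx? isVR with
      | none => simp
      | some i =>
        simp only [Option.map_some]
        rw [show (l :: ls).drop (i + 1) = ls.drop i from List.drop_succ_cons ..]
        rw [show (l :: ls).drop (i + 1 + 1) = ls.drop (i + 1) from List.drop_succ_cons ..]
        cases h2 : (ls.drop (i + 1)).findIdx? isTerm with
        | none =>
            show PySem.Str.join "\n" (List.take (ls.length - i) (List.drop i ls)) =
              PySem.Str.join "\n" (List.take ((l :: ls).length - (i + 1)) (List.drop i ls))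
            rw [show (l :: ls).length - (i + 1) = ls.length - i by simp]
        | some k =>
            show PySem.Str.join "\n" (List.take (i + 1 + k - i) (List.drop i ls)) =
              PySem.Str.join "\n" (List.take (i + 1 + 1 + k - (i + 1)) (List.drop i ls))
            rw [show i + 1 + 1 + k - (i + 1) = i + 1 + k - i by omega]

-- ===== VERDICT (by name: the statement is the Claim_ definition above) =====
theorem extract_vigilance_table_spec : Claim_equal_extract_vigilance_table := by
  intro stdout _
  unfold Spec_extract_vigilance_table extract_vigilance_table extract_vigilance_table_alt
  exact core_eq _
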